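-- pv_equiv track=rewrite | github.com/shoaib842/6companies30dayschallenge | Following a number pattern/main.py | printMinNumberForPattern
-- ===== SOURCE A (Python) =====
-- def printMinNumberForPattern(S):
--     n = len(S)
--     result = ''
--     stack = []
--
--     # Iterate through the pattern and process each character
--     for i in range(n + 1):
--         # Push the current digit onto the stack
--         stack.append(i + 1)
--
--         # If 'I' is encountered or end of the pattern,
--         # pop the digits from the stack and append to the result
--         if i == n or S[i] == 'I':
--             while stack:
--                 result += str(stack.pop())
--
--     return result
-- ===== SOURCE B (Python) =====
-- def printMinNumberForPattern(S):
--     n = len(S)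
--     out = []
--     i = 0  # start of the current run (pattern index); numbers in it start at i + 1
--     while True:
--         j = i
--         while j < n and S[j] != 'I':
--             j += 1
--         out.extend(range(j + 1, i, -1))  # the run's numbers, descending
--         if j == n:
--             break
--         i = j + 1
--     return ''.join(map(str, out))
-- ===== Notes on version B (the rewrite author's own statement) =====
-- stated objective: alternative
-- what changed: B replaces A's digit stack and per-character push/pop with a run scan: it locates each maximal run of non-increasing pattern characters, emits that run's numbers as one descending range, and joins the collected numbers once at the end instead of growing the result string by repeated concatenation.
import Mathlib
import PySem

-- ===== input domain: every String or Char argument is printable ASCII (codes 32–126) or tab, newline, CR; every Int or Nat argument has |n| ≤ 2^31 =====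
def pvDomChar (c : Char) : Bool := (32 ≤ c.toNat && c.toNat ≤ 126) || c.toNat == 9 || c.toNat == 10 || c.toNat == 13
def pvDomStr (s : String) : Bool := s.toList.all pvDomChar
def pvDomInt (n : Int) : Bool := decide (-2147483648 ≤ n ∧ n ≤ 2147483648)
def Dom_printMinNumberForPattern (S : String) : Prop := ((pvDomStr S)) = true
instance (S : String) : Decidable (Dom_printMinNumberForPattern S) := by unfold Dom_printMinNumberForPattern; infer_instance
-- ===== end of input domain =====

-- B replaces A's push/pop stack with a run scan that emits each decreasing run's
-- numbers as one descending range and joins once at the end (alternative algorithm).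

-- ===== PORT A =====
-- the inner `while stack: result += str(stack.pop())` loop
def pvPopAll (stack : List Int) (res : String) : String :=
  stack.reverse.foldl (fun r v => r ++ PySem.Int.toStr v) res

-- the `for i in range(n+1)` loop, recursing over the pattern with counter i
def pvLoopA : List Char → Int → List Int → String → String
  | [], i, stack, res => pvPopAll (stack ++ [i + 1]) res
  | c :: cs, i, stack, res =>
      let stack' := stack ++ [i + 1]
      if c = 'I' then pvLoopA cs (i + 1) [] (pvPopAll stack' res)
      else pvLoopA cs (i + 1) stack' res

def printMinNumberForPattern (S : String) : String :=
  pvLoopA S.toList 0 [] ""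

-- ===== PORT B =====
-- inner while loop: advance j to the end of the current non-'I' run
def pvInnerB (S : List Char) (j : Nat) : Nat :=
  if h : j < S.length then
    (if S[j] ≠ 'I' then pvInnerB S (j + 1) else j)
  else j
termination_by S.length - j

theorem pvInnerB_ge (S : List Char) (j : Nat) : j ≤ pvInnerB S j := by
  fun_induction pvInnerB S j with
  | case1 j h hne ih => omega
  | case2 j h hne => omega
  | case3 j h => omega

-- outer `while True` loop with the accumulated output list
def pvOuterB (S : List Char) (i : Nat) (out : List Int) : List Int :=
  let j := pvInnerB S i
  let out' := out ++ PySem.List.pyRange ((j : Int) + 1) (i : Int) (-1)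
  -- `j == n` in Python; `S.length ≤ j` makes the same test total (j ≤ n on every reachable state)
  if h : S.length ≤ j then out'
  else
    pvOuterB S (j + 1) out'
termination_by S.length - i
decreasing_by
  have := pvInnerB_ge S i
  omega

def pvJoin (l : List Int) : String :=
  l.foldl (fun r v => r ++ PySem.Int.toStr v) ""

def printMinNumberForPattern_alt (S : String) : String :=
  pvJoin (pvOuterB S.toList 0 [])

-- ===== PRECONDITION & SPEC =====
def Spec_printMinNumberForPattern (S : String) (out : String) : Prop := out = printMinNumberForPattern_alt S
instance (S : String) (out : String) : Decidable (Spec_printMinNumberForPattern S out) := by unfold Spec_printMinNumberForPattern; infer_instance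

-- ===== CLAIM (what is proved, stated in full; the proofs are below) =====
def Claim_equal_printMinNumberForPattern : Prop := ∀ (S : String), Dom_printMinNumberForPattern S → Spec_printMinNumberForPattern S (printMinNumberForPattern S)

-- ===== LEMMAS AND PROOFS =====

-- length of the leading run of non-'I' characters
def pvRun : List Char → Nat
  | [] => 0
  | c :: cs => if c = 'I' then 0 else pvRun cs + 1

theorem pvRun_le (cs : List Char) : pvRun cs ≤ cs.length := by
  induction cs with
  | nil => simp [pvRun]
  | cons c cs ih =>
      by_cases h : c = 'I'
      · simp [pvRun, h]
      · simp [pvRun, h]; omega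

theorem foldl_join (l : List Int) (r : String) :
    l.foldl (fun r v => r ++ PySem.Int.toStr v) r = r ++ pvJoin l := by
  induction l generalizing r with
  | nil => simp [pvJoin]
  | cons v l ih =>
      have h2 : pvJoin (v :: l) = ("" ++ PySem.Int.toStr v) ++ pvJoin l := by
        rw [pvJoin, List.foldl_cons]; exact ih _
      rw [List.foldl_cons, ih, h2]
      simp [String.append_assoc]

theorem pvJoin_append (a b : List Int) : pvJoin (a ++ b) = pvJoin a ++ pvJoin b := by
  rw [pvJoin, List.foldl_append, foldl_join]
  rfl

theorem pvPopAll_eq (l : List Int) (res : String) :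
    pvPopAll l res = res ++ pvJoin l.reverse := by
  simp only [pvPopAll, foldl_join]

-- behaviour of A's loop up to (and including) the next flush
theorem pvLoopA_run (cs : List Char) : ∀ (i : Int) (stack : List Int) (res : String),
    pvLoopA cs i stack res =
      if pvRun cs = cs.length then
        pvPopAll (stack ++ PySem.List.pyRange (i + 1) (i + pvRun cs + 2) 1) res
      else
        pvLoopA (cs.drop (pvRun cs + 1)) (i + pvRun cs + 1) []
          (pvPopAll (stack ++ PySem.List.pyRange (i + 1) (i + pvRun cs + 2) 1) res) := by
  induction cs with
  | nil =>
      intro i stack res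
      have h1 : PySem.List.pyRange (i + 1) (i + 2) 1 = [i + 1] := by
        rw [show (i + 2 : Int) = (i + 1) + 1 by ring]
        exact PySem.List.pyRange_one_singleton _
      simp [pvLoopA, h1, pvRun]
  | cons c cs ih =>
      intro i stack res
      by_cases hc : c = 'I'
      · have h1 : PySem.List.pyRange (i + 1) (i + 2) 1 = [i + 1] := by
          rw [show (i + 2 : Int) = (i + 1) + 1 by ring]
          exact PySem.List.pyRange_one_singleton _
        subst hc
        rw [pvLoopA]
        simp [pvRun, h1]
      · have hm : pvRun (c :: cs) = pvRun cs + 1 := by simp [pvRun, hc]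
        have hrange : PySem.List.pyRange (i + 1) (i + (pvRun (c :: cs) : Int) + 2) 1
            = (i + 1) :: PySem.List.pyRange ((i + 1) + 1) ((i + 1) + (pvRun cs : Int) + 2) 1 := by
          rw [PySem.List.pyRange_one_cons (by rw [hm]; push_cast; omega)]
          rw [hm]; push_cast; ring_nf
        have hlen : (pvRun (c :: cs) = (c :: cs).length) ↔ (pvRun cs = cs.length) := by
          rw [hm]; simp
        rw [pvLoopA]
        simp only [if_neg hc]
        rw [ih (i + 1) (stack ++ [i + 1]) res]
        by_cases hend : pvRun cs = cs.length
        · rw [if_pos hend, if_pos (hlen.mpr hend)]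
          rw [hrange, List.append_assoc]
          rfl
        · rw [if_neg hend, if_neg (fun h => hend (hlen.mp h))]
          rw [hrange, List.append_assoc]
          have hdrop : (c :: cs).drop (pvRun (c :: cs) + 1) = cs.drop (pvRun cs + 1) := by
            rw [hm]; simp
          rw [hdrop, hm]
          have : i + (pvRun cs + 1 : Nat) + 1 = i + 1 + (pvRun cs : Nat) + 1 := by push_cast; ring
          rw [this]
          rfl

theorem pvInner_eq (S : List Char) (i : Nat) (hi : i ≤ S.length) :
    pvInnerB S i = i + pvRun (S.drop i) := by
  fun_induction pvInnerB S i with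
  | case1 i h hne ih =>
      have hd : S.drop i = S[i] :: S.drop (i + 1) := List.drop_eq_getElem_cons h
      rw [hd, pvRun, if_neg hne, ih (by omega)]
      omega
  | case2 i h hne =>
      have hd : S.drop i = S[i] :: S.drop (i + 1) := List.drop_eq_getElem_cons h
      have : S[i] = 'I' := by simpa using hne
      rw [hd, pvRun, if_pos this]
      omega
  | case3 i h =>
      have : S.drop i = [] := List.drop_eq_nil_of_le (by omega)
      rw [this, pvRun]
      omega

theorem pvOuterB_acc : ∀ (n : Nat) (S : List Char) (i : Nat) (out : List Int),
    S.length - i ≤ n → pvOuterB S i out = out ++ pvOuterB S i [] := by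
  intro n
  induction n with
  | zero =>
      intro S i out hn
      have hj : S.length ≤ pvInnerB S i := le_trans (by omega) (pvInnerB_ge S i)
      conv_lhs => rw [pvOuterB]
      conv_rhs => rw [pvOuterB]
      simp [dif_pos hj]
  | succ n ih =>
      intro S i out hn
      by_cases h : S.length ≤ pvInnerB S i
      · conv_lhs => rw [pvOuterB]
        conv_rhs => rw [pvOuterB]
        simp [dif_pos h]
      · have hge := pvInnerB_ge S i
        have hmeas : S.length - (pvInnerB S i + 1) ≤ n := by omega
        conv_lhs => rw [pvOuterB]
        conv_rhs => rw [pvOuterB]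
        simp only [dif_neg h, List.nil_append]
        rw [ih S _ _ hmeas]
        conv_rhs => rw [ih S _ _ hmeas]
        simp [List.append_assoc]

theorem pvMain : ∀ (n : Nat) (S : List Char) (i : Nat) (res : String),
    S.length - i ≤ n → i ≤ S.length →
    pvLoopA (S.drop i) (i : Int) [] res = res ++ pvJoin (pvOuterB S i []) := by
  intro n
  induction n with
  | zero =>
      intro S i res hn hi
      have hieq : i = S.length := by omega
      have hd : S.drop i = [] := List.drop_eq_nil_of_le (by omega)
      have hj : pvInnerB S i = i := by rw [pvInner_eq S i hi, hd, pvRun]; omega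
      rw [pvOuterB]
      simp only [hj, dif_pos (by omega : S.length ≤ i)]
      rw [hd, pvLoopA_run, pvPopAll_eq]
      simp only [pvRun, List.length_nil, List.nil_append]
      rw [show ((i : Int) + ((0 : Nat) : Int) + 2) = ((i : Int) + 1 + 1) by push_cast; ring,
        ← PySem.List.pyRange_neg_one_eq_reverse]
      simp
  | succ n ih =>
      intro S i res hn hi
      rw [pvLoopA_run]
      set m := pvRun (S.drop i) with hmdef
      have hj : pvInnerB S i = i + m := pvInner_eq S i hi
      have hm_le : m ≤ S.length - i := by
        have := pvRun_le (S.drop i)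
        simpa using this
      have hrev : PySem.List.pyRange ((i + m : Nat) + 1) (i : Int) (-1)
          = (PySem.List.pyRange ((i : Int) + 1) ((i : Int) + (m : Int) + 2) 1).reverse := by
        rw [PySem.List.pyRange_neg_one_eq_reverse]
        congr 2
      by_cases hend : m = (S.drop i).length
      · have hieq : i + m = S.length := by
          have : (S.drop i).length = S.length - i := by simp
          omega
        rw [if_pos hend, pvOuterB]
        simp only [hj, dif_pos (by omega : S.length ≤ i + m), List.nil_append]
        rw [pvPopAll_eq, hrev]
      · have hlt : i + m < S.length := by
          have : (S.drop i).length = S.length - i := by simp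
          omega
        have hdd : (S.drop i).drop (m + 1) = S.drop (i + m + 1) := by
          rw [List.drop_drop, ← Nat.add_assoc]
        have hcast : (i : Int) + (m : Int) + 1 = ((i + m + 1 : Nat) : Int) := by omega
        rw [if_neg hend, pvOuterB]
        simp only [hj, dif_neg (by omega : ¬ S.length ≤ i + m), List.nil_append]
        rw [hrev, hdd, hcast, ih S (i + m + 1) _ (by omega) (by omega), pvPopAll_eq]
        conv_rhs => rw [pvOuterB_acc (S.length - (i + m + 1)) S (i + m + 1) _ (by omega)]
        rw [pvJoin_append, String.append_assoc]

-- ===== VERDICT (by name: the statement is the Claim_ definition above) =====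
theorem printMinNumberForPattern_spec : Claim_equal_printMinNumberForPattern := by
  intro S _
  unfold Spec_printMinNumberForPattern printMinNumberForPattern printMinNumberForPattern_alt
  have h := pvMain S.toList.length S.toList 0 "" (by omega) (by omega)
  simpa using h
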